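-- pv_equiv track=rewrite | github.com/thiagofaa23-a11y/EP2-DesSoft-Thiago | funcoes.py | calcula_pontos_quadra
-- ===== SOURCE A (Python) =====
-- def calcula_pontos_quadra(dados):
--
--     contagem = 0
--     soma = 0
--     i = 0
--
--     for dado in dados:
--
--         contagem = dados.count(dado)
--         if contagem >= 4:
--             for dado in dados:
--                 soma += dado
--             break
--
--
--     return soma
-- ===== SOURCE B (Python) =====
-- def calcula_pontos_quadra(dados):
--     ordenado = sorted(dados)
--     achou = False
--     anterior = None
--     run = 0
--     for v in ordenado:
--         if anterior is not None and v == anterior: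
--             run += 1
--         else:
--             run = 1
--         if run >= 4:
--             achou = True
--         anterior = v
--     return sum(dados) if achou else 0
-- ===== Notes on version B (the rewrite author's own statement) =====
-- stated objective: faster
-- what changed: Sorts a copy of the list and detects a run of 4 equal consecutive values in one pass, instead of rescanning the list with .count for every element.
import Mathlib
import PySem

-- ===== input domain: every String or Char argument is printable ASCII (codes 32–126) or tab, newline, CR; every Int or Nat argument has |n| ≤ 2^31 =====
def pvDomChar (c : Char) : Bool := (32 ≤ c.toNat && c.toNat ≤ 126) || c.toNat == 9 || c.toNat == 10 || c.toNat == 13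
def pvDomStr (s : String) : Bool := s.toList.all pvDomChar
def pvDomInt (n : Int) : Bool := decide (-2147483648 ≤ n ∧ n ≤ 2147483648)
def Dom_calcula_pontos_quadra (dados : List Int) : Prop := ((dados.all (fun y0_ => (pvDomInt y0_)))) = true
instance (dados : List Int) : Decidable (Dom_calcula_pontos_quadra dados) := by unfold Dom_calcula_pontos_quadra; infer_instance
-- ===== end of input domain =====

-- B sorts a copy of the list and detects a run of four equal consecutive values in one
-- pass, instead of A's per-element .count rescans (faster).

-- ===== PORT A =====
-- the 'for dado in dados' loop with its conditional break: first element whose count is ≥ 4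
-- triggers the inner summing loop and the break; otherwise soma stays 0
def pvAloop (dados : List Int) : List Int → Int
  | [] => 0
  | dado :: rest =>
      if 4 ≤ dados.count dado then dados.foldl (fun soma d => soma + d) 0
      else pvAloop dados rest

def calcula_pontos_quadra (dados : List Int) : Int := pvAloop dados dados

-- ===== PORT B =====
-- the 'for v in ordenado' loop over state (anterior, run, achou); returns achou at the end
def pvBloop : Option Int → Int → Bool → List Int → Bool
  | _, _, achou, [] => achou
  | anterior, run, achou, v :: rest =>
      let run' : Int := if anterior = some v then run + 1 else 1
      pvBloop (some v) run' (if 4 ≤ run' then true else achou) rest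

def calcula_pontos_quadra_alt (dados : List Int) : Int :=
  let ordenado := PySem.List.sorted dados (fun x => x) false
  if pvBloop none 0 false ordenado then dados.sum else 0

-- ===== PRECONDITION & SPEC =====
def Spec_calcula_pontos_quadra (dados : List Int) (out : Int) : Prop := out = calcula_pontos_quadra_alt dados
instance (dados : List Int) (out : Int) : Decidable (Spec_calcula_pontos_quadra dados out) := by unfold Spec_calcula_pontos_quadra; infer_instance

-- ===== CLAIM (what is proved, stated in full; the proofs are below) =====
def Claim_equal_calcula_pontos_quadra : Prop := ∀ (dados : List Int), Dom_calcula_pontos_quadra dados → Spec_calcula_pontos_quadra dados (calcula_pontos_quadra dados)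

-- ===== LEMMAS AND PROOFS =====

-- A's outer loop returns the sum iff some scanned element has count ≥ 4 in dados
lemma pvAloop_eq (dados : List Int) (l : List Int) :
    pvAloop dados l = if l.any (fun x => 4 ≤ dados.count x) then dados.sum else 0 := by
  induction l with
  | nil => simp [pvAloop]
  | cons a rest ih =>
      simp only [pvAloop, List.any_cons, ih]
      by_cases h : 4 ≤ dados.count a
      · simp [h, List.sum_eq_foldl.symm]
      · simp [h]

-- run-detector invariant on a sorted tail s all of whose elements are ≥ the previous value a:
-- it reports achou, or the run of a's continuing from run r reaching 4, or a later value with count ≥ 4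
lemma pvBloop_sorted (s : List Int) (hs : List.Pairwise (· ≤ ·) s) (a r : Int) (ach : Bool)
    (hge : ∀ x ∈ s, a ≤ x) (h4 : 4 ≤ r → ach = true) :
    pvBloop (some a) r ach s
      = (ach || decide (4 ≤ r + s.count a) || s.any (fun x => x ≠ a && decide (4 ≤ s.count x))) := by
  induction s generalizing a r ach with
  | nil =>
      simp only [pvBloop, List.count_nil, List.any_nil, Bool.or_false, Nat.cast_zero, add_zero]
      by_cases h : (4:Int) ≤ r
      · simp [h4 h, h]
      · simp [h]
  | cons v t ih =>
      obtain ⟨hhead, htail⟩ := List.pairwise_cons.mp hs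
      by_cases hv : v = a
      · subst hv
        have e1 : (if (some v = some v) then r + 1 else (1:Int)) = r + 1 := if_pos rfl
        simp only [pvBloop, if_true]
        rw [ih htail v (r + 1) _ hhead
              (by intro h; simp [show (4:Int) ≤ r + 1 from h])]
        have hc : (v :: t).count v = t.count v + 1 := by simp
        have hcx : ∀ x, x ≠ v → (v :: t).count x = t.count x := by
          intro x hx; simp [Ne.symm hx]
        rw [Bool.eq_iff_iff]
        simp only [Bool.or_eq_true, List.any_eq_true, decide_eq_true_eq, Bool.and_eq_true,
          ne_eq, decide_eq_true_eq, List.mem_cons, hc]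
        constructor
        · rintro ((h | h) | ⟨x, hx, hnx, hcnt⟩)
          · by_cases h1 : (4:Int) ≤ r + 1
            · left; right; push_cast; omega
            · rw [if_neg h1] at h; exact Or.inl (Or.inl h)
          · left; right; push_cast at h; push_cast; omega
          · refine Or.inr ⟨x, Or.inr hx, hnx, ?_⟩; have := hcx x hnx; omega
        · rintro ((h | h) | ⟨x, hx, hnx, hcnt⟩)
          · left; left; split_ifs with h1
            · rfl
            · exact h
          · left; right; push_cast at h ⊢; omega
          · rcases hx with rfl | hx
            · exact absurd rfl hnx
            · refine Or.inr ⟨x, hx, hnx, ?_⟩; have := hcx x hnx; omega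
      · -- new value: run resets to 1
        have hav : a < v := lt_of_le_of_ne (hge v List.mem_cons_self) (Ne.symm hv)
        have hat : ∀ x ∈ t, a < x := fun x hx => lt_of_lt_of_le hav (hhead x hx)
        have hca : (v :: t).count a = 0 := by
          rw [List.count_eq_zero]
          intro hmem
          rcases List.mem_cons.mp hmem with h | h
          · exact hv h.symm
          · exact absurd rfl (ne_of_gt (hat a h))
        have e2 : (if (some a = some v) then r + 1 else (1:Int)) = 1 :=
          if_neg (by simpa using fun h : a = v => hv h.symm)
        simp only [pvBloop, e2]
        rw [ih htail v 1 _ hhead (by intro h; omega)]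
        have h41 : ¬ (4:Int) ≤ 1 := by omega
        rw [if_neg h41]
        have hc : (v :: t).count v = t.count v + 1 := by simp
        rw [Bool.eq_iff_iff]
        simp only [Bool.or_eq_true, List.any_eq_true, decide_eq_true_eq, Bool.and_eq_true,
          ne_eq, decide_eq_true_eq, List.mem_cons, hca, hc]
        have hcx : ∀ x, x ≠ v → (v :: t).count x = t.count x := by
          intro x hx; simp [Ne.symm hx]
        constructor
        · rintro ((h | h) | ⟨x, hx, hnx, hcnt⟩)
          · exact Or.inl (Or.inl h)
          · refine Or.inr ⟨v, Or.inl rfl, hv, ?_⟩; push_cast at h ⊢; omega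
          · have hxa : x ≠ a := ne_of_gt (hat x hx)
            refine Or.inr ⟨x, Or.inr hx, hxa, ?_⟩
            have := hcx x hnx; omega
        · rintro ((h | h) | ⟨x, hx, hnx, hcnt⟩)
          · exact Or.inl (Or.inl h)
          · push_cast at h; exact Or.inl (Or.inl (h4 (by omega)))
          · rcases hx with rfl | hx
            · left; right; push_cast at hcnt; push_cast; omega
            · by_cases hxv : x = v
              · subst hxv; left; right; push_cast at hcnt; push_cast; omega
              · refine Or.inr ⟨x, hx, hxv, ?_⟩; have := hcx x hxv; omega

-- the whole scan on a sorted list: flag iff some element occurs ≥ 4 times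
lemma pvBloop_spec (s : List Int) (hs : List.Pairwise (· ≤ ·) s) :
    pvBloop none 0 false s = s.any (fun x => 4 ≤ s.count x) := by
  cases s with
  | nil => simp [pvBloop]
  | cons v t =>
      obtain ⟨hhead, htail⟩ := List.pairwise_cons.mp hs
      have e0 : (if (none = some v) then (0:Int) + 1 else 1) = 1 := if_neg (by simp)
      simp only [pvBloop, e0]
      rw [if_neg (by omega : ¬ (4:Int) ≤ 1)]
      rw [pvBloop_sorted t htail v 1 false hhead (by intro h; omega)]
      have hc : (v :: t).count v = t.count v + 1 := by simp
      have hcx : ∀ x, x ≠ v → (v :: t).count x = t.count x := by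
        intro x hx; simp [Ne.symm hx]
      rw [Bool.eq_iff_iff]
      simp only [Bool.false_or, Bool.or_eq_true, List.any_eq_true, decide_eq_true_eq,
        Bool.and_eq_true, ne_eq, decide_eq_true_eq, List.mem_cons, hc]
      constructor
      · rintro (h | ⟨x, hx, hnx, hcnt⟩)
        · exact ⟨v, Or.inl rfl, by push_cast at h ⊢; omega⟩
        · exact ⟨x, Or.inr hx, by have := hcx x hnx; omega⟩
      · rintro ⟨x, hx, hcnt⟩
        rcases hx with rfl | hx
        · left; push_cast at hcnt; push_cast; omega
        · by_cases hxv : x = v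
          · subst hxv; left; push_cast at hcnt; push_cast; omega
          · exact Or.inr ⟨x, hx, hxv, by have := hcx x hxv; omega⟩

-- counts and membership transfer between dados and its sorted copy
lemma pvSorted_any (dados : List Int) :
    ((PySem.List.sorted dados (fun x => x) false).any
        (fun x => 4 ≤ (PySem.List.sorted dados (fun x => x) false).count x))
      = dados.any (fun x => 4 ≤ dados.count x) := by
  have hperm := PySem.List.sorted_perm dados (fun x => x) false
  rw [Bool.eq_iff_iff]
  simp only [List.any_eq_true, decide_eq_true_eq]
  constructor
  · rintro ⟨x, hx, h⟩
    exact ⟨x, hperm.mem_iff.mp hx, by rwa [hperm.count_eq] at h⟩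
  · rintro ⟨x, hx, h⟩
    exact ⟨x, hperm.mem_iff.mpr hx, by rwa [hperm.count_eq]⟩

-- ===== VERDICT (by name: the statement is the Claim_ definition above) =====
theorem calcula_pontos_quadra_spec : Claim_equal_calcula_pontos_quadra := by
  intro dados _
  show calcula_pontos_quadra dados = calcula_pontos_quadra_alt dados
  unfold calcula_pontos_quadra calcula_pontos_quadra_alt
  rw [pvAloop_eq]
  have h1 := pvBloop_spec (PySem.List.sorted dados (fun x => x) false)
    (by simpa using PySem.List.sorted_pairwise dados (fun x => x))
  simp only [h1, pvSorted_any]
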